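-- pv_equiv track=rewrite | github.com/sebvz777/Bachelorthesis | Web13_BCS09.py | shift_complex
-- ===== SOURCE A (Python) =====
-- import math
--
-- def shift_complex(l):
--     outlist = []
--     for k in range(len(l)):
--         out = 0
--         for i in range(k + 1):
--             out += math.comb(k, i) * l[i]
--         outlist.append(out)
--
--     return outlist
-- ===== SOURCE B (Python) =====
-- def shift_complex(l):
--     cur = [l[i] for i in range(len(l))]
--     outlist = []
--     while cur:
--         outlist.append(cur[0])
--         cur = [a + b for a, b in zip(cur, cur[1:])]
--     return outlist
-- ===== Notes on version B (the rewrite author's own statement) =====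
-- stated objective: faster
-- what changed: Replaces the explicit double loop with binomial coefficients (math.comb) by iterated adjacent summation: repeatedly emit the first element and replace the array by pairwise sums, which yields the binomial transform by Pascal's rule using only additions.
import Mathlib
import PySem

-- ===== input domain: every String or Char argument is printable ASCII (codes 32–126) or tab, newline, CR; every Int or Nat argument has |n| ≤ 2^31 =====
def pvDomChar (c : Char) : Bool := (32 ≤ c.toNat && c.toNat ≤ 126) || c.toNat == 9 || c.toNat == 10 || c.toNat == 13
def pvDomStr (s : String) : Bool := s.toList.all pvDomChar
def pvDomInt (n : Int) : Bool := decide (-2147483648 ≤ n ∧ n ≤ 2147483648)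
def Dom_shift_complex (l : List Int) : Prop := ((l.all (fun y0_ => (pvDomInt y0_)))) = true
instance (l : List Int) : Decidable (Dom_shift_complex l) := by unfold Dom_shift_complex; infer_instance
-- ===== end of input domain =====

-- B computes the binomial transform by iterated adjacent (pairwise) summation instead of
-- explicit binomial coefficients; constant-factor faster (no math.comb), alternative algorithm.

-- ===== PORT A =====
-- outer loop over k in range(len(l)); inner loop accumulates comb(k,i)*l[i].
-- l[i] has 0 ≤ i ≤ k < len l, always in range, so List.getD is exact here; math.comb = Nat.choose.
def shift_complex (l : List Int) : List Int :=
  (List.range l.length).map (fun k =>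
    (List.range (k + 1)).foldl (fun out i => out + (Nat.choose k i : Int) * l.getD i 0) 0)

-- ===== PORT B =====
-- the while loop: emit cur[0], replace cur by [a+b for a,b in zip(cur, cur[1:])]
def shiftAltLoop : List Int → List Int
  | [] => []
  | a :: t => a :: shiftAltLoop (List.zipWith (· + ·) (a :: t) t)
termination_by l => l.length
decreasing_by simp [List.length_zipWith]

def shift_complex_alt (l : List Int) : List Int := shiftAltLoop l

-- ===== PRECONDITION & SPEC =====
def Spec_shift_complex (l : List Int) (out : List Int) : Prop := out = shift_complex_alt l
instance (l : List Int) (out : List Int) : Decidable (Spec_shift_complex l out) := by unfold Spec_shift_complex; infer_instance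

-- ===== CLAIM (what is proved, stated in full; the proofs are below) =====
def Claim_equal_shift_complex : Prop := ∀ (l : List Int), Dom_shift_complex l → Spec_shift_complex l (shift_complex l)

-- ===== LEMMAS AND PROOFS =====

-- the k-th output of A as a Finset sum
def pvS (k : Nat) (l : List Int) : Int :=
  ∑ i ∈ Finset.range (k + 1), (Nat.choose k i : Int) * l.getD i 0

-- the pairwise-sum step of B
def pvStep (l : List Int) : List Int := List.zipWith (· + ·) l l.tail

lemma pvStep_length (l : List Int) : (pvStep l).length = l.length - 1 := by
  simp [pvStep, List.length_zipWith]

lemma foldl_range_sum (f : Nat → Int) (c : Int) (n : Nat) :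
    List.foldl (fun a i => a + f i) c (List.range n) = c + ∑ i ∈ Finset.range n, f i := by
  induction n generalizing c with
  | zero => simp
  | succ m ih => rw [List.range_succ, List.foldl_append, ih]
                 simp only [List.foldl_cons, List.foldl_nil, Finset.sum_range_succ]
                 ring

lemma shift_complex_eq_S (l : List Int) :
    shift_complex l = (List.range l.length).map (fun k => pvS k l) := by
  unfold shift_complex pvS
  refine List.map_congr_left (fun k _ => ?_)
  rw [foldl_range_sum]; ring

lemma pvStep_getD (l : List Int) (i : Nat) (h : i + 1 < l.length) :
    (pvStep l).getD i 0 = l.getD i 0 + l.getD (i + 1) 0 := by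
  have hi : i < (pvStep l).length := by rw [pvStep_length]; omega
  rw [List.getD_eq_getElem _ _ hi, List.getD_eq_getElem _ _ (by omega : i < l.length),
      List.getD_eq_getElem _ _ h]
  simp [pvStep]

lemma pascal_step (k : Nat) (l : List Int) (h : k + 1 < l.length) :
    pvS k (pvStep l) = pvS (k + 1) l := by
  unfold pvS
  have hstep : ∀ i ∈ Finset.range (k + 1),
      (Nat.choose k i : Int) * (pvStep l).getD i 0
        = (Nat.choose k i : Int) * l.getD i 0 + (Nat.choose k i : Int) * l.getD (i + 1) 0 := by
    intro i hi
    rw [pvStep_getD l i (by simp at hi; omega)]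
    ring
  rw [Finset.sum_congr rfl hstep, Finset.sum_add_distrib]
  -- RHS: peel i = 0
  rw [Finset.sum_range_succ' (fun i => (Nat.choose (k+1) i : Int) * l.getD i 0) (k+1)]
  have hchoose : ∀ i, (Nat.choose (k+1) (i+1) : Int) = (Nat.choose k i : Int) + (Nat.choose k (i+1) : Int) := by
    intro i
    rw [Nat.choose_succ_succ]
    push_cast; ring
  have : (∑ i ∈ Finset.range (k+1), (Nat.choose (k+1) (i+1) : Int) * l.getD (i+1) 0)
      = (∑ i ∈ Finset.range (k+1), (Nat.choose k i : Int) * l.getD (i+1) 0)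
        + (∑ i ∈ Finset.range (k+1), (Nat.choose k (i+1) : Int) * l.getD (i+1) 0) := by
    rw [← Finset.sum_add_distrib]
    refine Finset.sum_congr rfl (fun i _ => ?_)
    rw [hchoose]; ring
  rw [this]
  -- shift: ∑_{i<k+1} C(k,i+1) l[i+1] = ∑_{i<k+1} C(k,i) l[i] - l[0]
  have hshift : (∑ i ∈ Finset.range (k+1), (Nat.choose k (i+1) : Int) * l.getD (i+1) 0)
      = (∑ i ∈ Finset.range (k+1), (Nat.choose k i : Int) * l.getD i 0) - (Nat.choose k 0 : Int) * l.getD 0 0 := by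
    rw [Finset.sum_range_succ' (fun i => (Nat.choose k i : Int) * l.getD i 0) k]
    have : (Nat.choose k (k+1) : Int) * l.getD (k+1) 0 = 0 := by
      simp
    rw [Finset.sum_range_succ, this]
    ring
  rw [hshift]
  simp [Nat.choose_zero_right]
  ring

lemma shiftAltLoop_eq (l : List Int) :
    shiftAltLoop l = (List.range l.length).map (fun k => pvS k l) := by
  induction hn : l.length generalizing l with
  | zero =>
    rcases l with _ | ⟨a, t⟩
    · rw [shiftAltLoop]; simp
    · simp at hn
  | succ m ih =>
    rcases l with _ | ⟨a, t⟩
    · simp at hn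
    · have hm : t.length = m := by simpa using hn
      rw [shiftAltLoop]
      have hlen : (pvStep (a :: t)).length = m := by rw [pvStep_length]; simp [hm]
      have ihstep := ih (pvStep (a :: t)) hlen
      have : List.zipWith (· + ·) (a :: t) t = pvStep (a :: t) := by simp [pvStep]
      rw [this, ihstep, List.range_succ_eq_map, List.map_cons, List.map_map]
      congr 1
      · simp [pvS]
      · refine List.map_congr_left (fun k hk => ?_)
        simp only [Function.comp]
        exact pascal_step k (a :: t) (by simp [hm]; exact List.mem_range.mp hk)

-- ===== VERDICT (by name: the statement is the Claim_ definition above) =====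
theorem shift_complex_spec : Claim_equal_shift_complex := by
  intro l _
  unfold Spec_shift_complex shift_complex_alt
  rw [shiftAltLoop_eq, shift_complex_eq_S]
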